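-- pv_equiv track=rewrite | github.com/amandamurphy2025/projects | CMSC_14100/homework_3.py | how_many_equal_first
-- ===== SOURCE A (Python) =====
-- def how_many_equal_first(lst):
--     """
--     how_many_equal_first compares the values in rest of the list to
--     the first value to determine whether:
--       - all the values in the rest of the list equal the first value,
--       - at least some of the values in the rest of the equal the first value, or
--       - none of the values in the result of the list equal the first value
--
--     Inputs:
--         lst: a non-empty list of integers
--
--     Returns: (string)
--       -- "all" if all the values in the list are equal to the first one, or if
--           the list only contains one element
--       -- "some" if at least one value after the first one is equal to the
--           first one
--       -- "not_any" if none of the values after the first one match the first one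
--
--     """
--     assert len(lst) > 0
--
--     result = None
--
--     idx_first = []
--
--     for idx, val in enumerate(lst):
--         if val == lst[0]:
--             idx_first.append(idx)
--
--     if len(idx_first) == len(lst):
--         result = "all"
--     elif sum(idx_first) == 0:
--         result = "not_any"
--     elif len(idx_first) < len(lst):
--         result = "some"
--
--     return result
-- ===== SOURCE B (Python) =====
-- def how_many_equal_first(lst):
--     assert len(lst) > 0
--     first = lst[0]
--     if all(x == first for x in lst[1:]):
--         return "all"
--     if any(x == first for x in lst[1:]):
--         return "some"
--     return "not_any"
-- ===== Notes on version B (the rewrite author's own statement) =====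
-- stated objective: idiomatic
-- what changed: Replaces A's collect-all-matching-indices pass plus length/sum-of-indices tests with two short-circuiting predicate scans (all/any) over the tail.
import Mathlib
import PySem

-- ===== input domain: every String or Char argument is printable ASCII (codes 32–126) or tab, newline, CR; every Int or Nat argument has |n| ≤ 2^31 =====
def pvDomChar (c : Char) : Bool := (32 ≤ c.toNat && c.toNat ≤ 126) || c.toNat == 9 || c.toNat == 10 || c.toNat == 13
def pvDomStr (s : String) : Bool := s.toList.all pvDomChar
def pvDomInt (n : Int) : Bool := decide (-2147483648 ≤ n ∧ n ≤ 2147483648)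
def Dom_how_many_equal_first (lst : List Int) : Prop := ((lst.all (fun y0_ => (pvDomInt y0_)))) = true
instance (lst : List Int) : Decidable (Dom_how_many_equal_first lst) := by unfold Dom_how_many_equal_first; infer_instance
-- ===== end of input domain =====

-- B replaces A's collect-matching-indices pass and length/sum-of-indices tests with
-- two direct short-circuiting predicate scans (all/any) over the tail; idiomatic, same cost.

-- ===== PORT A =====
def how_many_equal_first (lst : List Int) : String :=
  match lst with
  | [] => ""   -- unreachable: the assert raises on [], excluded by Pre_
  | h :: _ =>
    let idx_first := (PySem.List.enumerate lst 0).foldl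
      (fun acc p => if p.2 = h then acc ++ [p.1] else acc) []
    if idx_first.length = lst.length then "all"
    else if idx_first.foldl (· + ·) 0 = 0 then "not_any"
    else if idx_first.length < lst.length then "some"
    else ""   -- result stays None (never reached)

-- ===== PORT B =====
def how_many_equal_first_alt (lst : List Int) : String :=
  match lst with
  | [] => ""   -- unreachable: the assert raises on [], excluded by Pre_
  | first :: rest =>
    if rest.all (· == first) then "all"
    else if rest.any (· == first) then "some"
    else "not_any"

-- ===== PRECONDITION & SPEC =====
-- Pre_ excludes exactly the empty list, on which A's assert raises AssertionError.
def Pre_how_many_equal_first (lst : List Int) : Prop := lst ≠ []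
instance (lst : List Int) : Decidable (Pre_how_many_equal_first lst) := by unfold Pre_how_many_equal_first; infer_instance
def pvWitness_how_many_equal_first : List Int := [1, 2, 1]

def Spec_how_many_equal_first (lst : List Int) (out : String) : Prop := out = how_many_equal_first_alt lst
instance (lst : List Int) (out : String) : Decidable (Spec_how_many_equal_first lst out) := by unfold Spec_how_many_equal_first; infer_instance

-- ===== CLAIM (what is proved, stated in full; the proofs are below) =====
def Claim_equal_how_many_equal_first : Prop := ∀ (lst : List Int), Dom_how_many_equal_first lst → Pre_how_many_equal_first lst → Spec_how_many_equal_first lst (how_many_equal_first lst)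

-- ===== LEMMAS AND PROOFS =====

-- A's index-collecting fold is filter-then-map over the enumeration.
theorem hmef_fold_eq_filter (t : List Int) (h : Int) (s : Int) (acc : List Int) :
    (PySem.List.enumerate t s).foldl
      (fun acc p => if p.2 = h then acc ++ [p.1] else acc) acc
      = acc ++ ((PySem.List.enumerate t s).filter (fun p => decide (p.2 = h))).map Prod.fst := by
  induction t generalizing s acc with
  | nil => simp [PySem.List.enumerate_nil]
  | cons x xs ih =>
    simp only [PySem.List.enumerate_cons, List.foldl_cons, List.filter_cons]
    by_cases hx : x = h
    · simp [hx, ih]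
    · simp [hx, ih]

-- length of the kept indices = count of matching values
theorem hmef_filter_length (t : List Int) (h : Int) (s : Int) :
    ((PySem.List.enumerate t s).filter (fun p => decide (p.2 = h))).length
      = t.countP (fun x => decide (x = h)) := by
  induction t generalizing s with
  | nil => simp [PySem.List.enumerate_nil]
  | cons x xs ih =>
    simp only [PySem.List.enumerate_cons, List.filter_cons, List.countP_cons]
    by_cases hx : x = h
    · simp [hx, ih]
    · simp [hx, ih]

-- every kept index is ≥ s
theorem hmef_filter_ge (t : List Int) (h : Int) (s : Int) :
    ∀ p ∈ (PySem.List.enumerate t s).filter (fun p => decide (p.2 = h)), s ≤ p.1 := by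
  induction t generalizing s with
  | nil => simp [PySem.List.enumerate_nil]
  | cons x xs ih =>
    intro p hp
    rw [PySem.List.enumerate_cons, List.filter_cons] at hp
    by_cases hx : (fun p : Int × Int => decide (p.2 = h)) (s, x) = true
    · rw [if_pos hx] at hp
      rcases List.mem_cons.mp hp with hp | hp
      · simp [hp]
      · have := ih (s + 1) p hp; omega
    · rw [if_neg hx] at hp
      have := ih (s + 1) p hp; omega

-- foldl (+) over a list of nonnegative ints starting at a is ≥ a, with equality iff all terms vanish… we only need: sum of positives is 0 iff list empty
theorem hmef_foldl_add_pos (l : List Int) (a : Int) (hpos : ∀ x ∈ l, 0 < x) (ha : 0 ≤ a) :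
    (l.foldl (· + ·) a = 0) ↔ (a = 0 ∧ l = []) := by
  induction l generalizing a with
  | nil => simp
  | cons x xs ih =>
    have hx : 0 < x := hpos x (by simp)
    simp only [List.foldl_cons]
    rw [ih (a + x) (fun y hy => hpos y (by simp [hy])) (by omega)]
    constructor
    · rintro ⟨h1, h2⟩; exact absurd h1 (by omega)
    · rintro ⟨h1, h2⟩; simp at h2
  
theorem hmef_main (lst : List Int) (hpre : lst ≠ []) :
    how_many_equal_first lst = how_many_equal_first_alt lst := by
  match lst with
  | [] => exact absurd rfl hpre
  | h :: t =>
    have hstep : (PySem.List.enumerate (h :: t) 0).filter (fun p => decide (p.2 = h))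
        = ((0 : Int), h) :: (PySem.List.enumerate t 1).filter (fun p => decide (p.2 = h)) := by
      rw [PySem.List.enumerate_cons, List.filter_cons_of_pos (by simp)]
      norm_num
    simp only [how_many_equal_first, how_many_equal_first_alt]
    rw [hmef_fold_eq_filter]
    simp only [hstep, List.nil_append, List.map_cons]
    set F := (PySem.List.enumerate t 1).filter (fun p => decide (p.2 = h)) with hF
    have hlen : F.length = t.countP (fun x => decide (x = h)) := hmef_filter_length t h 1
    have hge : ∀ p ∈ F, (1 : Int) ≤ p.1 := hmef_filter_ge t h 1
    -- branch analysis
    by_cases hall : t.all (· == h)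
    · -- every element of t equals h, so countP = t.length
      have hc : t.countP (fun x => decide (x = h)) = t.length := by
        apply List.countP_eq_length.mpr
        intro x hx
        simpa using (List.all_eq_true.mp hall x hx)
      have : (Prod.fst (0, h) :: F.map Prod.fst).length = (h :: t).length := by
        simp [hlen, hc]
      rw [if_pos this, if_pos hall]
    · have hc : t.countP (fun x => decide (x = h)) ≠ t.length := by
        intro hc
        apply hall
        apply List.all_eq_true.mpr
        intro x hx
        simpa using List.countP_eq_length.mp hc x hx
      have hlenne : (Prod.fst (0, h) :: F.map Prod.fst).length ≠ (h :: t).length := by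
        simp [hlen]
        by_contra hno
        push Not at hno
        exact hc (List.countP_eq_length.mpr (fun x hx => by simp [hno x hx]))
      rw [if_neg hlenne, if_neg hall]
      by_cases hany : t.any (· == h)
      · -- some match: F nonempty, so sum > 0
        obtain ⟨x, hx, hxe⟩ := List.any_eq_true.mp hany
        have hFne : F ≠ [] := by
          intro hemp
          have : t.countP (fun x => decide (x = h)) = 0 := by rw [← hlen, hemp]; rfl
          have := List.countP_eq_zero.mp this x hx
          simp at this hxe
          exact this hxe
        have hsum : ¬ ((Prod.fst (0, h) :: F.map Prod.fst).foldl (· + ·) 0 = 0) := by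
          simp only [List.foldl_cons]
          rw [hmef_foldl_add_pos (F.map Prod.fst) ((0:Int) + Prod.fst (0, h))
            (by intro x hx; obtain ⟨p, hp, rfl⟩ := List.mem_map.mp hx; have := hge p hp; omega)
            (by simp)]
          intro ⟨_, hemp⟩
          exact hFne (List.map_eq_nil_iff.mp hemp)
        rw [if_neg hsum, if_pos (by simp [hlen] at hlenne ⊢; have := List.countP_le_length (p := fun x => decide (x = h)) (l := t); omega), if_pos hany]
      · -- no match: F = [], sum = 0
        have hF0 : F = [] := by
          apply List.eq_nil_of_length_eq_zero
          rw [hlen]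
          apply List.countP_eq_zero.mpr
          intro x hx hxe
          exact absurd (List.any_eq_true.mpr ⟨x, hx, by simpa using hxe⟩) hany
        have hsum : (Prod.fst (0, h) :: F.map Prod.fst).foldl (· + ·) 0 = 0 := by
          simp [hF0]
        rw [if_pos hsum, if_neg hany]

-- ===== VERDICT (by name: the statement is the Claim_ definition above) =====
theorem how_many_equal_first_spec : Claim_equal_how_many_equal_first := by
  intro lst _ hpre
  exact hmef_main lst hpre
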